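-- pv_equiv track=rewrite | github.com/pypi-data/pypi-mirror-335 | packages/rich-gradient/rich_gradient-0.2.0-py3-none-any.whl/rich_gradient/gradient.py | array_split
-- ===== SOURCE A (Python) =====
-- def array_split(arr, indices_or_sections):
--     if isinstance(indices_or_sections, int):
--         if indices_or_sections <= 0:
--             raise ValueError("Number of sections must be greater than 0.")
--
--         # Calculate the size of each section
--         section_size = len(arr) // indices_or_sections
--         remainder = len(arr) % indices_or_sections
--
--         sections = []
--         start = 0
--
--         for i in range(indices_or_sections):
--             end = start + section_size + (1 if i < remainder else 0)
--             sections.append(arr[start:end])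
--             start = end
--
--         return sections
--
--     elif isinstance(indices_or_sections, (list, tuple)):
--         sections = []
--         prev_index = 0
--
--         for index in indices_or_sections:
--             sections.append(arr[prev_index:index])
--             prev_index = index
--
--         sections.append(arr[prev_index:])
--
--         return sections
--
--     else:
--         raise TypeError(
--             "indices_or_sections must be an integer or a list/tuple of integers."
--         )
-- ===== SOURCE B (Python) =====
-- def array_split(arr, indices_or_sections):
--     if isinstance(indices_or_sections, int):
--         n = indices_or_sections
--         if n <= 0:
--             raise ValueError("Number of sections must be greater than 0.")
--         sections = []
--         rest = arr
--         k = n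
--         while k > 1:
--             head = rest[:-(-len(rest) // k)]
--             sections.append(head)
--             rest = rest[len(head):]
--             k -= 1
--         sections.append(rest[:])
--         return sections
--     elif isinstance(indices_or_sections, (list, tuple)):
--         cuts = list(indices_or_sections)
--         return [arr[a:b] for a, b in zip([0] + cuts, cuts + [len(arr)])]
--     else:
--         raise TypeError(
--             "indices_or_sections must be an integer or a list/tuple of integers."
--         )
-- ===== Notes on version B (the rewrite author's own statement) =====
-- stated objective: alternative
-- what changed: B replaces A's loop over a precomputed section_size/remainder with a running start index by a peeling decomposition: repeatedly cut off the ceil-division head chunk rest[:ceil(len(rest)/k)] of the shrinking remainder and decrement the section count (list/tuple branch pairs shifted boundary lists with zip instead of a prev_index accumulator).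
import Mathlib
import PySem

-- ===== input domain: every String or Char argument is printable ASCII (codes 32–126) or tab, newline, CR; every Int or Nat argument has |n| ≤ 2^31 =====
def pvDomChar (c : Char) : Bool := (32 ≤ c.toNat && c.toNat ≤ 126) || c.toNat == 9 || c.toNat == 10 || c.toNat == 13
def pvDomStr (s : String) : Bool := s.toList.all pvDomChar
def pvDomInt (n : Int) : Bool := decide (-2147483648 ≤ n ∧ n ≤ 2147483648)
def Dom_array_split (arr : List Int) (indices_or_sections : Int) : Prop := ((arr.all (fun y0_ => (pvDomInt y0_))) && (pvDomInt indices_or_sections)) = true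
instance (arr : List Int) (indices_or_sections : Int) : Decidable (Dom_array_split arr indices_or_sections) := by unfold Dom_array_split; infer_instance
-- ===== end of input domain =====

-- B replaces A's single loop (precomputed section_size/remainder, running start) by a
-- peeling decomposition: repeatedly cut the ceil-division head chunk off the shrinking
-- remainder (objective: alternative decomposition).
-- Only the int branch is portable here (indices_or_sections : Int); n ≤ 0 raises in both.

-- ===== PORT A =====
-- A: compute section_size and remainder, then loop i in range(n) keeping (sections, start),
-- appending arr[start:end] with end = start + size + (1 if i < remainder else 0).
def array_split (arr : List Int) (indices_or_sections : Int) : List (List Int) :=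
  let section_size := PySem.Int.floordiv (arr.length : Int) indices_or_sections
  let remainder := PySem.Int.mod (arr.length : Int) indices_or_sections
  ((PySem.List.pyRange 0 indices_or_sections 1).foldl
    (fun (st : List (List Int) × Int) i =>
      let e := st.2 + section_size + (if i < remainder then 1 else 0)
      (st.1 ++ [PySem.List.slice arr (some st.2) (some e)], e))
    ([], 0)).1

-- ===== PORT B =====
-- B: while k > 1 peel head = rest[:-(-len(rest)//k)] off the remaining array, then append
-- rest[:]; the loop is this structural recursion on (rest, k).  (n ≤ 0 raises ValueError in
-- Python; excluded by Pre_, port returns [].)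
def array_split_alt (arr : List Int) (indices_or_sections : Int) : List (List Int) :=
  if indices_or_sections ≤ 0 then []
  else if indices_or_sections = 1 then [PySem.List.slice arr none none]
  else
    let head := PySem.List.slice arr none
      (some (-(PySem.Int.floordiv (-(arr.length : Int)) indices_or_sections)))
    head :: array_split_alt (PySem.List.slice arr (some (head.length : Int)) none)
      (indices_or_sections - 1)
termination_by indices_or_sections.toNat
decreasing_by omega

-- ===== PRECONDITION & SPEC =====
-- Pre_ excludes indices_or_sections ≤ 0, on which A raises ValueError.
def Pre_array_split (_arr : List Int) (indices_or_sections : Int) : Prop :=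
  0 < indices_or_sections
instance (arr : List Int) (indices_or_sections : Int) : Decidable (Pre_array_split arr indices_or_sections) := by unfold Pre_array_split; infer_instance

def pvWitness_array_split : List Int × Int := ([1, 2, 3, 4, 5], 3)

def Spec_array_split (arr : List Int) (indices_or_sections : Int) (out : List (List Int)) : Prop := out = array_split_alt arr indices_or_sections
instance (arr : List Int) (indices_or_sections : Int) (out : List (List Int)) : Decidable (Spec_array_split arr indices_or_sections out) := by unfold Spec_array_split; infer_instance

-- ===== CLAIM (what is proved, stated in full; the proofs are below) =====
def Claim_equal_array_split : Prop := ∀ (arr : List Int) (indices_or_sections : Int), Dom_array_split arr indices_or_sections → Pre_array_split arr indices_or_sections → Spec_array_split arr indices_or_sections (array_split arr indices_or_sections)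

-- ===== LEMMAS AND PROOFS =====

-- Nat-level cut point of section i: i*q + min i r (q = len//n, r = len%n).
def cutN (q r i : Nat) : Nat := i * q + min i r

-- Reference form both ports are reduced to: section i is drop (cut i), take (cut (i+1) - cut i).
def refSplit (arr : List Int) (n : Nat) : List (List Int) :=
  (List.range n).map (fun k =>
    (arr.drop (cutN (arr.length / n) (arr.length % n) k)).take
      (cutN (arr.length / n) (arr.length % n) (k + 1) - cutN (arr.length / n) (arr.length % n) k))

-- A's loop invariant: starting at iteration k with start = k*q + min k r.
lemma array_split_loop_inv (arr : List Int) (q r n k : Int) (acc : List (List Int))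
    (hk : 0 ≤ k) (hr : 0 ≤ r) :
    ((PySem.List.pyRange k n 1).foldl
      (fun (st : List (List Int) × Int) i =>
        let e := st.2 + q + (if i < r then 1 else 0)
        (st.1 ++ [PySem.List.slice arr (some st.2) (some e)], e))
      (acc, k * q + min k r)).1
    = acc ++ (PySem.List.pyRange k n 1).map
        (fun i => PySem.List.slice arr (some (i * q + min i r)) (some ((i + 1) * q + min (i + 1) r))) := by
  by_cases h : n ≤ k
  · rw [PySem.List.pyRange_one_eq_nil h]; simp
  · rw [not_le] at h
    have hrec := array_split_loop_inv arr q r n (k + 1)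
      (acc ++ [PySem.List.slice arr (some (k * q + min k r)) (some ((k + 1) * q + min (k + 1) r))])
      (by omega) hr
    rw [PySem.List.pyRange_one_cons h]
    simp only [List.foldl_cons, List.map_cons]
    have hstep : k * q + min k r + q + (if k < r then 1 else 0) = (k + 1) * q + min (k + 1) r := by
      by_cases hc : k < r
      · rw [if_pos hc]; rw [min_eq_left (by omega), min_eq_left (by omega)]; ring
      · rw [if_neg hc]; rw [min_eq_right (by omega), min_eq_right (by omega)]; ring
    rw [hstep, hrec]
    simp
termination_by (n - k).toNat
decreasing_by omega

-- A equals the reference form.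
lemma array_split_eq_ref (arr : List Int) (n : Nat) (hn : 0 < n) :
    array_split arr (n : Int) = refSplit arr n := by
  have hr : (0:Int) ≤ PySem.Int.mod (arr.length : Int) (n : Int) :=
    PySem.Int.mod_nonneg (a := (arr.length : Int)) (b := (n : Int)) (by exact_mod_cast hn)
  have h := array_split_loop_inv arr (PySem.Int.floordiv (arr.length : Int) (n : Int))
    (PySem.Int.mod (arr.length : Int) (n : Int)) (n : Int) 0 [] le_rfl hr
  simp only [zero_mul, zero_add, min_eq_left hr, List.nil_append] at h
  have h2 : (PySem.List.pyRange 0 (n : Int) 1).map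
      (fun i => PySem.List.slice arr
        (some (i * PySem.Int.floordiv (arr.length : Int) (n : Int)
               + min i (PySem.Int.mod (arr.length : Int) (n : Int))))
        (some ((i + 1) * PySem.Int.floordiv (arr.length : Int) (n : Int)
               + min (i + 1) (PySem.Int.mod (arr.length : Int) (n : Int)))))
      = refSplit arr n := by
    rw [PySem.List.pyRange_one 0 (n : Int), List.map_map]
    unfold refSplit
    simp only [sub_zero, Int.toNat_natCast]
    apply List.map_congr_left
    intro k _
    simp only [Function.comp_apply, zero_add]
    rw [PySem.Int.floordiv_natCast, PySem.Int.mod_natCast]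
    have hc1 : ((k : Int) * ((arr.length / n : Nat) : Int) + min (k : Int) ((arr.length % n : Nat) : Int))
        = ((cutN (arr.length / n) (arr.length % n) k : Nat) : Int) := by
      unfold cutN; push_cast; ring_nf
    have hc2 : (((k : Int) + 1) * ((arr.length / n : Nat) : Int) + min ((k : Int) + 1) ((arr.length % n : Nat) : Int))
        = ((cutN (arr.length / n) (arr.length % n) (k + 1) : Nat) : Int) := by
      unfold cutN; push_cast; ring_nf
    rw [hc1, hc2, PySem.List.slice_natCast]
  exact h.trans h2

-- The ceiling head size: -((-L) // n) casts the Nat value L/n + (0 if n ∣ L else 1).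
lemma ceil_head (L n : Nat) (hn : 0 < n) :
    -(PySem.Int.floordiv (-(L : Int)) (n : Int))
      = ((L / n + (if L % n = 0 then 0 else 1) : Nat) : Int) := by
  have hnI : (0:Int) < (n : Int) := by exact_mod_cast hn
  rw [PySem.Int.neg_floordiv_neg_eq_iff_of_pos hnI]
  have hLd : (L / n) * n + L % n = L := by
    have h := Nat.div_add_mod L n
    rw [Nat.mul_comm] at h
    exact h
  have key : ((L / n : Nat) : Int) * (n : Int) + ((L % n : Nat) : Int) = (L : Int) := by
    exact_mod_cast congrArg (Nat.cast (R := Int)) hLd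
  have hmodI : ((L % n : Nat) : Int) < (n : Int) := by
    exact_mod_cast Nat.mod_lt L hn
  by_cases h0 : L % n = 0
  · have hRz : ((L % n : Nat) : Int) = 0 := by rw [h0]; rfl
    have hScast : (((L / n + (if L % n = 0 then 0 else 1) : Nat)) : Int) = ((L / n : Nat) : Int) := by
      rw [if_pos h0, Nat.add_zero]
    rw [hScast]
    constructor
    · nlinarith [key, hnI, hRz]
    · nlinarith [key, hRz]
  · have hR1 : (1:Int) ≤ ((L % n : Nat) : Int) := by
      exact_mod_cast Nat.one_le_iff_ne_zero.mpr h0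
    have hScast : (((L / n + (if L % n = 0 then 0 else 1) : Nat)) : Int) = ((L / n : Nat) : Int) + 1 := by
      rw [if_neg h0, Nat.cast_add, Nat.cast_one]
    rw [hScast]
    constructor
    · nlinarith [key, hR1]
    · nlinarith [key, hmodI]

-- B equals the reference form (induction on n, peeling the head chunk).
lemma array_split_alt_eq_ref : ∀ (n : Nat), 1 ≤ n → ∀ (arr : List Int),
    array_split_alt arr (n : Int) = refSplit arr n := by
  intro n
  induction n with
  | zero => intro h; omega
  | succ m ih =>
    intro _ arr
    by_cases hm : m = 0
    · subst hm
      rw [array_split_alt]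
      norm_num [refSplit, cutN, PySem.List.slice_none_none]
    · have hm1 : 1 ≤ m := Nat.one_le_iff_ne_zero.mpr hm
      set L := arr.length with hL
      set q := L / (m + 1) with hq
      set r := L % (m + 1) with hrdef
      have hdm : (m + 1) * q + r = L := Nat.div_add_mod L (m + 1)
      have hrlt : r < m + 1 := Nat.mod_lt _ (by omega)
      set s := q + (if r = 0 then 0 else 1) with hs
      have hs0 : r = 0 → s = q := fun h0 => by rw [hs, if_pos h0, Nat.add_zero]
      have hs1 : r ≠ 0 → s = q + 1 := fun h0 => by rw [hs, if_neg h0]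
      have hqle : q ≤ (m + 1) * q := Nat.le_mul_of_pos_left q (by omega)
      have hsL : s ≤ L := by
        by_cases h0 : r = 0
        · rw [hs0 h0]; linarith [hdm, hqle]
        · rw [hs1 h0]
          have h1 : 1 ≤ r := Nat.one_le_iff_ne_zero.mpr h0
          linarith [hdm, hqle]
      rw [array_split_alt]
      rw [show ((m + 1 : Nat) : Int) = (m : Int) + 1 from by push_cast; ring]
      rw [if_neg (show ¬((m : Int) + 1 ≤ 0) from by omega),
          if_neg (show ¬((m : Int) + 1 = 1) from by omega)]
      have hceil : -(PySem.Int.floordiv (-(L : Int)) ((m : Int) + 1)) = ((s : Nat) : Int) := by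
        have hc := ceil_head L (m + 1) (by omega)
        rw [show ((m + 1 : Nat) : Int) = (m : Int) + 1 from by push_cast; ring] at hc
        rw [hc, hs]
      rw [← hL]
      simp only [hceil, PySem.List.slice_to_natCast]
      rw [show ((arr.take s).length) = s from by rw [List.length_take]; omega]
      rw [PySem.List.slice_from_natCast]
      rw [show ((m : Int) + 1 - 1) = ((m : Nat) : Int) from by omega]
      rw [ih hm1 (arr.drop s)]
      have hdlen : (arr.drop s).length = L - s := by rw [List.length_drop, ← hL]
      -- tail division parameters: quotient stays q, remainder drops by one (to 0 at 0)
      have htail : (arr.drop s).length / m = q ∧ (arr.drop s).length % m = r - 1 := by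
        rw [hdlen]
        by_cases h0 : r = 0
        · have hLs : L - s = m * q := by
            refine Nat.sub_eq_of_eq_add ?_
            rw [hs0 h0]
            rw [← hdm, h0]; ring
          rw [hLs, Nat.mul_div_cancel_left _ (by omega : 0 < m), Nat.mul_mod_right]
          exact ⟨rfl, by omega⟩
        · obtain ⟨r', hr1⟩ : ∃ r', r = r' + 1 := ⟨r - 1, by omega⟩
          have hLs : L - s = m * q + r' := by
            refine Nat.sub_eq_of_eq_add ?_
            rw [hs1 h0]
            rw [← hdm, hr1]; ring
          have hr'lt : r' < m := by omega
          rw [hLs, Nat.mul_add_div (by omega : 0 < m), Nat.div_eq_of_lt hr'lt, Nat.add_zero,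
              Nat.mul_add_mod, Nat.mod_eq_of_lt hr'lt]
          exact ⟨rfl, by omega⟩
      unfold refSplit
      rw [htail.1, htail.2, ← hL, ← hq, ← hrdef]
      rw [List.range_succ_eq_map, List.map_cons, List.map_map]
      have hshift : ∀ j, cutN q r (j + 1) = s + cutN q (r - 1) j := by
        intro j
        unfold cutN
        rw [Nat.succ_mul]
        by_cases h0 : r = 0
        · rw [hs0 h0, h0]; omega
        · rw [hs1 h0]
          have h1 : 1 ≤ r := Nat.one_le_iff_ne_zero.mpr h0
          omega
      congr 1
      · -- head = section 0
        have h1q : cutN q r 1 = s := by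
          unfold cutN
          by_cases h0 : r = 0
          · rw [hs0 h0, h0]; omega
          · rw [hs1 h0]
            have h1 : 1 ≤ r := Nat.one_le_iff_ne_zero.mpr h0
            omega
        have h0q : cutN q r 0 = 0 := by unfold cutN; omega
        rw [h0q, h1q, List.drop_zero, Nat.sub_zero]
      · -- shifted sections
        apply List.map_congr_left
        intro k _
        simp only [Function.comp_apply, Nat.succ_eq_add_one]
        rw [List.drop_drop, ← hshift k]
        congr 1
        rw [hshift (k + 1), hshift k]
        omega

-- ===== VERDICT (by name: the statement is the Claim_ definition above) =====
theorem array_split_spec : Claim_equal_array_split := by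
  intro arr n _hdom hpre
  replace hpre : 0 < n := hpre
  unfold Spec_array_split
  have hn : n = ((n.toNat : Nat) : Int) := by omega
  rw [hn, array_split_eq_ref arr n.toNat (by omega),
      array_split_alt_eq_ref n.toNat (by omega) arr]
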